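-- pv_equiv track=rewrite | github.com/Uuuuu77/alx-higher_level_programming | 0x04-python-more_data_structures/12-roman_to_int.py | roman_list
-- ===== SOURCE A (Python) =====
-- roman = dict([('I', 1), ('V', 5), ('X', 10), ('L', 50), ('C', 100), ('D', 500),
--     ('M', 1000), ('IV', 4), ('IX', 9), ('XL', 40),
--     ('XC', 90), ('CD', 400), ('CM', 900)])
--
-- def roman_list(rom_str):
--     lists = []
--     x = 0
--     while (x < len(rom_str)):
--         if rom_str[x:x+2] in roman:
--             lists += [rom_str[x:x+2]]
--             x += 2
--         else:
--             lists += [rom_str[x]]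
--             x += 1
--     return lists
-- ===== SOURCE B (Python) =====
-- # One pass over adjacent character pairs with a skip flag; the six subtractive
-- # pairs are tested directly, the final character is appended in a fixup step.
-- def roman_list(rom_str):
--     PAIRS = ('IV', 'IX', 'XL', 'XC', 'CD', 'CM')
--     out = []
--     skip = False
--     for ch, nxt in zip(rom_str, rom_str[1:]):
--         if skip:
--             skip = False
--         elif ch + nxt in PAIRS:
--             out.append(ch + nxt)
--             skip = True
--         else:
--             out.append(ch)
--     if rom_str and not skip:
--         out.append(rom_str[-1])
--     return out
-- ===== Notes on version B (the rewrite author's own statement) =====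
-- stated objective: simpler
-- what changed: The index-driven while loop slicing rom_str[x:x+2] each step and testing it against the 13-key value dict is replaced by a single for-loop over zip(rom_str, rom_str[1:]) with a skip flag testing only the six subtractive pairs, plus a last-char fixup.
import Mathlib
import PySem

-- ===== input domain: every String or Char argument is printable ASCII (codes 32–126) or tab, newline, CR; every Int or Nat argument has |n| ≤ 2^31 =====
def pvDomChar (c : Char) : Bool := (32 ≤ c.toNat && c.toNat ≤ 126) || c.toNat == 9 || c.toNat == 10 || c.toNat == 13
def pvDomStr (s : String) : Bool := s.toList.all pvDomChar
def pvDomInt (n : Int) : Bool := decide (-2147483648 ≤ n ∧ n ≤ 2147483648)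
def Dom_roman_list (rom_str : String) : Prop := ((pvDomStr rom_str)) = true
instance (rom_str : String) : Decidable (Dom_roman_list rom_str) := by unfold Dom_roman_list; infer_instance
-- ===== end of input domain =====

-- Port of A (index while-loop testing 2-char slices against the 13-key dict) vs B (one pass
-- over adjacent char pairs with a skip flag, testing only the six subtractive pairs); B is
-- simpler: no index arithmetic and no dict.


-- ===== PORT A =====
-- the module-level dict `roman`
def romanDict : PySem.Dict String Int :=
  PySem.Dict.ofList [("I",1),("V",5),("X",10),("L",50),("C",100),("D",500),
    ("M",1000),("IV",4),("IX",9),("XL",40),("XC",90),("CD",400),("CM",900)]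

-- the while loop: `cs` is the suffix rom_str[x:]; rom_str[x:x+2] = take 2, x += 2 / x += 1
def romanLoop (cs : List Char) : List String :=
  match cs with
  | [] => []
  | c :: rest =>
    let pair := String.ofList ((c :: rest).take 2)
    if romanDict.contains pair then
      pair :: romanLoop (rest.drop 1)
    else
      String.ofList [c] :: romanLoop rest
termination_by cs.length
decreasing_by
  · simp only [List.length_cons, List.length_drop]; omega
  · simp

def roman_list (rom_str : String) : List String := romanLoop rom_str.toList

-- ===== PORT B =====
-- Source B's PAIRS tuple
def pairsB : List String := ["IV", "IX", "XL", "XC", "CD", "CM"]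

-- one iteration of Source B's for-loop over zip(rom_str, rom_str[1:]); state = (out, skip)
def stepB (st : List String × Bool) (p : Char × Char) : List String × Bool :=
  if st.2 = true then (st.1, false)
  else if pairsB.contains (String.ofList [p.1, p.2]) then    -- ch + nxt in PAIRS
    (st.1 ++ [String.ofList [p.1, p.2]], true)
  else (st.1 ++ [String.ofList [p.1]], false)

-- Source B's final fixup: `if rom_str and not skip: out.append(rom_str[-1])`
-- (rom_str[-1] on a nonempty string = getLast?, which also carries the emptiness test)
def finalizeB (cs : List Char) (st : List String × Bool) : List String :=
  match cs.getLast?, st.2 with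
  | some c, false => st.1 ++ [String.ofList [c]]
  | _, _ => st.1

def roman_list_alt (rom_str : String) : List String :=
  let cs := rom_str.toList
  finalizeB cs ((cs.zip cs.tail).foldl stepB ([], false))

-- ===== PRECONDITION & SPEC =====
def Spec_roman_list (rom_str : String) (out : List String) : Prop := out = roman_list_alt rom_str
instance (rom_str : String) (out : List String) : Decidable (Spec_roman_list rom_str out) := by unfold Spec_roman_list; infer_instance

-- ===== CLAIM (what is proved, stated in full; the proofs are below) =====
def Claim_equal_roman_list : Prop := ∀ (rom_str : String), Dom_roman_list rom_str → Spec_roman_list rom_str (roman_list rom_str)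

-- ===== LEMMAS AND PROOFS =====

lemma romanDict_keys :
    romanDict.keys = ["I","V","X","L","C","D","M","IV","IX","XL","XC","CD","CM"] := by
  decide

-- on a two-character key, A's dict membership and B's pair-tuple membership coincide
lemma dict_eq_pairsB (c d : Char) :
    romanDict.contains (String.ofList [c, d]) = pairsB.contains (String.ofList [c, d]) := by
  rw [PySem.Dict.contains_eq_decide_mem_keys, romanDict_keys, List.contains_eq_mem,
    decide_eq_decide]
  simp only [show ("I":String) = String.ofList ['I'] from rfl,
    show ("V":String) = String.ofList ['V'] from rfl,
    show ("X":String) = String.ofList ['X'] from rfl,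
    show ("L":String) = String.ofList ['L'] from rfl,
    show ("C":String) = String.ofList ['C'] from rfl,
    show ("D":String) = String.ofList ['D'] from rfl,
    show ("M":String) = String.ofList ['M'] from rfl,
    show ("IV":String) = String.ofList ['I','V'] from rfl,
    show ("IX":String) = String.ofList ['I','X'] from rfl,
    show ("XL":String) = String.ofList ['X','L'] from rfl,
    show ("XC":String) = String.ofList ['X','C'] from rfl,
    show ("CD":String) = String.ofList ['C','D'] from rfl,
    show ("CM":String) = String.ofList ['C','M'] from rfl,
    pairsB, List.mem_cons, List.not_mem_nil, or_false, String.ofList_inj,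
    List.cons.injEq, and_true, reduceCtorEq, and_false, false_or]

lemma finalizeB_cons_cons (c d : Char) (rest : List Char) (st : List String × Bool) :
    finalizeB (c :: d :: rest) st = finalizeB (d :: rest) st := by
  simp [finalizeB, List.getLast?_cons_cons]

-- invariant of B's fold: starting from (acc, False) it appends exactly A's token list
lemma main_inv : ∀ (cs : List Char) (acc : List String),
    finalizeB cs ((cs.zip cs.tail).foldl stepB (acc, false)) = acc ++ romanLoop cs := by
  intro cs
  induction cs using romanLoop.induct with
  | case1 => intro acc; simp [finalizeB, romanLoop]
  | case2 c rest pair h ih =>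
    intro acc
    rw [show pair = String.ofList ((c :: rest).take 2) from rfl] at h
    clear_value pair; clear pair
    rcases rest with _ | ⟨d, rest2⟩
    · rw [romanLoop]
      simp only [List.take_succ_cons, List.take_nil] at h
      simp [finalizeB, h, romanLoop]
    · simp only [List.take_succ_cons, List.take_zero] at h
      have hB : String.ofList [c, d] ∈ pairsB := by
        have hd := dict_eq_pairsB c d
        rw [hd] at h
        simpa using h
      simp only [List.drop_succ_cons, List.drop_zero] at ih
      rw [romanLoop]
      simp only [List.take_succ_cons, List.take_zero, h, if_true,
        List.drop_succ_cons, List.drop_zero]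
      rcases rest2 with _ | ⟨e, rest3⟩
      · simp [stepB, hB, finalizeB, romanLoop]
      · have hzip : ((c :: d :: e :: rest3).zip (c :: d :: e :: rest3).tail) =
            (c, d) :: (d, e) :: ((e :: rest3).zip (e :: rest3).tail) := by simp
        rw [hzip, List.foldl_cons, List.foldl_cons,
          show stepB (acc, false) (c, d) = (acc ++ [String.ofList [c, d]], true) by
            simp [stepB, hB],
          show stepB (acc ++ [String.ofList [c, d]], true) (d, e)
              = (acc ++ [String.ofList [c, d]], false) by simp [stepB],
          finalizeB_cons_cons, finalizeB_cons_cons, ih (acc ++ [String.ofList [c, d]])]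
        simp
  | case3 c rest pair h ih =>
    intro acc
    rw [show pair = String.ofList ((c :: rest).take 2) from rfl] at h
    clear_value pair; clear pair
    rcases rest with _ | ⟨d, rest2⟩
    · rw [romanLoop]
      simp only [List.take_succ_cons, List.take_nil] at h
      simp [finalizeB, h, romanLoop]
    · simp only [List.take_succ_cons, List.take_zero] at h
      have hB : String.ofList [c, d] ∉ pairsB := by
        have hd := dict_eq_pairsB c d
        rw [hd] at h
        simpa using h
      rw [romanLoop]
      simp only [List.take_succ_cons, List.take_zero, h, if_false, Bool.false_eq_true]
      have hzip : ((c :: d :: rest2).zip (c :: d :: rest2).tail) =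
          (c, d) :: ((d :: rest2).zip (d :: rest2).tail) := by simp
      rw [hzip, List.foldl_cons,
        show stepB (acc, false) (c, d) = (acc ++ [String.ofList [c]], false) by
          simp [stepB, hB],
        finalizeB_cons_cons, ih (acc ++ [String.ofList [c]])]
      simp

-- ===== VERDICT (by name: the statement is the Claim_ definition above) =====
theorem roman_list_spec : Claim_equal_roman_list := by
  intro s _
  unfold Spec_roman_list roman_list roman_list_alt
  simpa using (main_inv s.toList []).symm
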